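-- pv_equiv track=rewrite | github.com/yeahzizi/algorithm | 프로그래머스/코딩테스트 고득점 kit/level 2/PR. stackandqueue. 기능개발.py | solution
-- ===== SOURCE A (Python) =====
-- import math
--
-- def solution(progresses, speeds):
--     answer = []
--     finish = []
--
--     for i in range(len(progresses)):
--         for j in range(len(speeds)):
--             if i == j:
--                 work = math.ceil((100 - progresses[i]) / speeds[j])
--                 finish.append(work)
--
--     cnt = 1
--     max_num = finish[0]
--     for i in range(1, len(finish) + 1):
--         if i == len(finish):
--             answer.append(cnt)
--             break
--         if max_num < finish[i]:
--             answer.append(cnt)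
--             cnt = 1
--             max_num = finish[i]
--         else:
--             cnt += 1
--
--     return answer
-- ===== SOURCE B (Python) =====
-- import math
--
-- def solution(progresses, speeds):
--     # three-stage pipeline: per-task finish days, prefix maxima (= each task's
--     # release day), then the multiplicity of each release day in an
--     # insertion-ordered dict; the dict's values are the batch sizes in order.
--     days = [math.ceil((100 - p) / s) for p, s in zip(progresses, speeds)]
--     prefix = []
--     m = None
--     for d in days:
--         m = d if m is None or d > m else m
--         prefix.append(m)
--     counts = {}
--     for v in prefix:
--         counts[v] = counts.get(v, 0) + 1
--     return list(counts.values())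
-- ===== Notes on version B (the rewrite author's own statement) =====
-- stated objective: faster
-- what changed: Replaces A's quadratic i==j double loop and its run-length counting loop (running max + counter + break) by an O(n) staged pipeline: finish days from zip, prefix maxima giving each task its release day, and an insertion-ordered dict counting the multiplicity of each release day, whose values are the answer.
import Mathlib
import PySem

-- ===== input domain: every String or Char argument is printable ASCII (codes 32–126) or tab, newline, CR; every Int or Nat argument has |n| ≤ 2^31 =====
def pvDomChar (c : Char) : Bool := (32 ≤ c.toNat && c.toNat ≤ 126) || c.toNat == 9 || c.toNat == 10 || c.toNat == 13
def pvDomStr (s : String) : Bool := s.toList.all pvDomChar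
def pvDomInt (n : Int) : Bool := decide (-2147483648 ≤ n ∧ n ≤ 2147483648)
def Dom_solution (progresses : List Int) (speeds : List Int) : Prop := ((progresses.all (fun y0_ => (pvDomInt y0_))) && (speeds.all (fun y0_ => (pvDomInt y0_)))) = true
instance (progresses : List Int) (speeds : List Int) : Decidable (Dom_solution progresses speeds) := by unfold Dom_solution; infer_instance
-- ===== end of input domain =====

-- B replaces A's O(n^2) i==j double loop and run-length counting loop by an O(n) staged
-- pipeline: finish days, prefix maxima (release days), and a dict counting each release
-- day's multiplicity (measured asymptotic speed-up).

-- ===== PORT A =====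
-- math.ceil(a / b) on ints: for |a|, |b| ≤ 2^31 + 100 (guaranteed by Dom) the float
-- division error is < 1/|b|, so the float ceil equals the exact rational ceil ported here.
def mathCeilDiv (a b : Int) : Int := -(PySem.Int.floordiv (-a) b)

-- the second loop of A: for i in range(1, len(finish)+1) with the i == len break
def solutionLoop (finish : List Int) (cnt maxNum : Int) (answer : List Int) (i : Nat) : List Int :=
  if i = finish.length then answer ++ [cnt]
  else if finish.length < i then answer
  else
    let fi := PySem.List.pyGetD finish (i : Int) 0
    if maxNum < fi then solutionLoop finish 1 fi (answer ++ [cnt]) (i + 1)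
    else solutionLoop finish (cnt + 1) maxNum answer (i + 1)
termination_by finish.length - i
decreasing_by all_goals omega

def solution (progresses : List Int) (speeds : List Int) : List Int :=
  let finish := (PySem.List.pyRange 0 progresses.length 1).foldl (fun acc i =>
      (PySem.List.pyRange 0 speeds.length 1).foldl (fun acc2 j =>
        if i == j then
          acc2 ++ [mathCeilDiv (100 - PySem.List.pyGetD progresses i 0) (PySem.List.pyGetD speeds j 0)]
        else acc2) acc) []
  solutionLoop finish 1 (PySem.List.pyGetD finish 0 0) [] 1

-- ===== PORT B =====
-- same exact integer ceiling as mathCeilDiv, applied to one (progress, speed) pair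
def dayOf (ps : Int × Int) : Int := -(PySem.Int.floordiv (-(100 - ps.1)) ps.2)

-- B's second stage: m = d if m is None or d > m else m; prefix.append(m)
def prefStep (st : List Int × Option Int) (d : Int) : List Int × Option Int :=
  let m := match st.2 with
    | none => d
    | some m0 => if m0 < d then d else m0
  (st.1 ++ [m], some m)

def solution_alt (progresses : List Int) (speeds : List Int) : List Int :=
  let days := (progresses.zip speeds).map dayOf
  let pref := (days.foldl prefStep ([], none)).1
  let counts := pref.foldl (fun d v => d.insert v (d.getD v 0 + 1)) PySem.Dict.empty
  counts.values

-- ===== PRECONDITION & SPEC =====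
-- Pre_ excludes inputs where Python A raises: empty progresses or speeds (IndexError on
-- finish[0]) and a zero speed at an index below len(progresses) (ZeroDivisionError).
def Pre_solution (progresses : List Int) (speeds : List Int) : Prop :=
  progresses ≠ [] ∧ speeds ≠ [] ∧ ∀ x ∈ speeds.take progresses.length, x ≠ 0
instance (progresses : List Int) (speeds : List Int) : Decidable (Pre_solution progresses speeds) := by unfold Pre_solution; infer_instance
def pvWitness_solution : List Int × List Int := ([93, 30, 55], [1, 30, 5])

def Spec_solution (progresses : List Int) (speeds : List Int) (out : List Int) : Prop := out = solution_alt progresses speeds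
instance (progresses : List Int) (speeds : List Int) (out : List Int) : Decidable (Spec_solution progresses speeds out) := by unfold Spec_solution; infer_instance

-- ===== CLAIM (what is proved, stated in full; the proofs are below) =====
def Claim_equal_solution : Prop := ∀ (progresses : List Int) (speeds : List Int), Dom_solution progresses speeds → Pre_solution progresses speeds → Spec_solution progresses speeds (solution progresses speeds)

-- ===== LEMMAS AND PROOFS =====

-- reference grouping: the deploy counts of a list of finish days, given the current
-- running maximum and the size of the current group
def grp (maxNum cnt : Int) : List Int → List Int
  | [] => [cnt]
  | d :: rest => if maxNum < d then cnt :: grp d 1 rest else grp maxNum (cnt + 1) rest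

-- prefix maxima of ds continuing a running maximum m
def prefScan (m : Int) : List Int → List Int
  | [] => []
  | d :: ds => (if m < d then d else m) :: prefScan (if m < d then d else m) ds

lemma inner_none (i : Int) (g : Int → Int) (js : List Int) (acc : List Int)
    (h : i ∉ js) :
    js.foldl (fun acc2 j => if i == j then acc2 ++ [g j] else acc2) acc = acc := by
  induction js generalizing acc with
  | nil => rfl
  | cons j js ih =>
      simp only [List.mem_cons, not_or] at h
      rw [List.foldl_cons, if_neg (by simpa using h.1)]
      exact ih acc h.2

lemma inner_eq (i : Int) (g : Int → Int) (js : List Int) (acc : List Int)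
    (hnd : js.Nodup) :
    js.foldl (fun acc2 j => if i == j then acc2 ++ [g j] else acc2) acc
      = acc ++ (if i ∈ js then [g i] else []) := by
  induction js generalizing acc with
  | nil => simp
  | cons j js ih =>
      rcases List.nodup_cons.mp hnd with ⟨hj, hnd'⟩
      by_cases hij : i = j
      · subst hij
        rw [List.foldl_cons, if_pos (by simp), inner_none _ g js _ hj]
        simp
      · rw [List.foldl_cons, if_neg (by simpa using hij), ih acc hnd']
        simp [List.mem_cons, hij]

lemma outer_eq (g : Int → Int) (slen : Nat) (n : Nat) :
    (PySem.List.pyRange 0 (n : Int) 1).foldl (fun acc i =>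
        (PySem.List.pyRange 0 (slen : Int) 1).foldl (fun acc2 j =>
          if i == j then acc2 ++ [g j] else acc2) acc) []
      = (List.range (min n slen)).map (fun k : Nat => g (k : Int)) := by
  induction n with
  | zero => simp [PySem.List.pyRange_one_eq_nil]
  | succ n ih =>
      have hcast : ((n + 1 : Nat) : Int) = (n : Int) + 1 := by push_cast; ring
      rw [hcast, PySem.List.pyRange_one_succ_right (by positivity), List.foldl_append]
      simp only [List.foldl_cons, List.foldl_nil]
      rw [ih, inner_eq ((n : Int)) g _ _ (PySem.List.nodup_pyRange_one 0 (slen : Int))]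
      by_cases hn : n < slen
      · have hmem : (n : Int) ∈ PySem.List.pyRange 0 (slen : Int) 1 := by
          rw [PySem.List.mem_pyRange_one]; constructor <;> [positivity; exact_mod_cast hn]
        rw [if_pos hmem]
        have : min (n + 1) slen = min n slen + 1 := by omega
        rw [this, List.range_succ, List.map_append]
        have : min n slen = n := by omega
        simp [this]
      · have hmem : (n : Int) ∉ PySem.List.pyRange 0 (slen : Int) 1 := by
          rw [PySem.List.mem_pyRange_one]; rintro ⟨-, h2⟩; exact hn (by exact_mod_cast h2)
        rw [if_neg hmem]
        have : min (n + 1) slen = min n slen := by omega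
        simp [this]

-- A's finish list is exactly the per-feature day counts of the zipped lists
lemma finish_eq (progresses speeds : List Int) :
    (PySem.List.pyRange 0 progresses.length 1).foldl (fun acc i =>
        (PySem.List.pyRange 0 speeds.length 1).foldl (fun acc2 j =>
          if i == j then
            acc2 ++ [mathCeilDiv (100 - PySem.List.pyGetD progresses i 0) (PySem.List.pyGetD speeds j 0)]
          else acc2) acc) []
      = (progresses.zip speeds).map dayOf := by
  have h := outer_eq (fun j => mathCeilDiv (100 - PySem.List.pyGetD progresses j 0)
      (PySem.List.pyGetD speeds j 0)) speeds.length progresses.length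
  have hfun : ∀ (acc : List Int) (i : Int),
      (PySem.List.pyRange 0 (speeds.length : Int) 1).foldl (fun acc2 j =>
        if i == j then
          acc2 ++ [mathCeilDiv (100 - PySem.List.pyGetD progresses i 0) (PySem.List.pyGetD speeds j 0)]
        else acc2) acc
      = (PySem.List.pyRange 0 (speeds.length : Int) 1).foldl (fun acc2 j =>
        if i == j then
          acc2 ++ [mathCeilDiv (100 - PySem.List.pyGetD progresses j 0) (PySem.List.pyGetD speeds j 0)]
        else acc2) acc := by
    intro acc i
    apply PySem.List.foldl_congr_mem
    intro acc2 j _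
    by_cases hij : i = j
    · subst hij; rfl
    · simp [beq_iff_eq, hij]
  calc (PySem.List.pyRange 0 progresses.length 1).foldl (fun acc i =>
        (PySem.List.pyRange 0 speeds.length 1).foldl (fun acc2 j =>
          if i == j then
            acc2 ++ [mathCeilDiv (100 - PySem.List.pyGetD progresses i 0) (PySem.List.pyGetD speeds j 0)]
          else acc2) acc) []
      = (PySem.List.pyRange 0 progresses.length 1).foldl (fun acc i =>
        (PySem.List.pyRange 0 speeds.length 1).foldl (fun acc2 j =>
          if i == j then
            acc2 ++ [mathCeilDiv (100 - PySem.List.pyGetD progresses j 0) (PySem.List.pyGetD speeds j 0)]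
          else acc2) acc) [] := by
        apply PySem.List.foldl_congr_mem
        intro acc i _
        exact hfun acc i
    _ = (List.range (min progresses.length speeds.length)).map (fun k : Nat =>
          mathCeilDiv (100 - PySem.List.pyGetD progresses (k : Int) 0)
            (PySem.List.pyGetD speeds (k : Int) 0)) := h
    _ = (progresses.zip speeds).map dayOf := by
        apply List.ext_getElem
        · simp [List.length_zip]
        · intro k h1 h2
          simp only [List.length_map, List.length_range] at h1
          have hp : k < progresses.length := by omega
          have hs : k < speeds.length := by omega
          simp only [List.getElem_map, List.getElem_range, List.getElem_zip]
          simp [hp, hs, dayOf, mathCeilDiv]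

-- A's index loop computes grp over the remaining suffix
lemma loopA_eq (finish : List Int) (k : Nat) :
    ∀ (i : Nat), finish.length - i ≤ k → i ≤ finish.length →
    ∀ (cnt m : Int) (answer : List Int),
      solutionLoop finish cnt m answer i = answer ++ grp m cnt (finish.drop i) := by
  induction k with
  | zero =>
      intro i hk hi cnt m answer
      have : i = finish.length := by omega
      subst this
      rw [solutionLoop, if_pos rfl]
      simp [grp]
  | succ k ih =>
      intro i hk hi cnt m answer
      by_cases hend : i = finish.length
      · subst hend
        rw [solutionLoop, if_pos rfl]
        simp [grp]
      · have hlt : i < finish.length := by omega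
        have hdrop : finish.drop i = finish[i] :: finish.drop (i + 1) :=
          List.drop_eq_getElem_cons hlt
        have hget : PySem.List.pyGetD finish (i : Int) 0 = finish[i] := by
          simp [hlt]
        rw [solutionLoop, if_neg hend, if_neg (by omega)]
        simp only [hget]
        by_cases hm : m < finish[i]
        · rw [if_pos hm, ih (i + 1) (by omega) (by omega), hdrop]
          simp [grp, hm]
        · rw [if_neg hm, ih (i + 1) (by omega) (by omega), hdrop]
          simp [grp, hm]

-- B's prefix loop, once started, appends prefScan
lemma pref_fold (ds : List Int) :
    ∀ (acc : List Int) (m : Int), ∃ mf,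
      ds.foldl prefStep (acc, some m) = (acc ++ prefScan m ds, some mf) := by
  induction ds with
  | nil => intro acc m; exact ⟨m, by simp [prefScan]⟩
  | cons d ds ih =>
      intro acc m
      obtain ⟨mf, hmf⟩ := ih (acc ++ [if m < d then d else m]) (if m < d then d else m)
      exact ⟨mf, by simp [List.foldl_cons, prefStep, hmf, prefScan]⟩

-- counting the multiplicities of prefScan m ds on top of a dict ending in (m, cnt)
-- with all earlier keys < m yields exactly the group sizes grp m cnt ds
lemma countFold (ds : List Int) :
    ∀ (d : PySem.Dict Int Int) (pre : List (Int × Int)) (m cnt : Int),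
      d.items = pre ++ [(m, cnt)] →
      (∀ k ∈ pre.map Prod.fst, k < m) →
      (pre.map Prod.fst).Nodup →
      ((prefScan m ds).foldl (fun d v => d.insert v (d.getD v 0 + 1)) d).values
        = pre.map Prod.snd ++ grp m cnt ds := by
  induction ds with
  | nil =>
      intro d pre m cnt hitems hlt hnd
      simp [prefScan, grp, PySem.Dict.values, hitems]
  | cons dd ds ih =>
      intro d pre m cnt hitems hlt hnd
      have hkeys : d.keys = pre.map Prod.fst ++ [m] := by
        simp [PySem.Dict.keys, hitems]
      have hndk : d.keys.Nodup := by
        rw [hkeys]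
        refine List.Nodup.append hnd (List.nodup_singleton m) ?_
        intro a ha hb
        simp only [List.mem_singleton] at hb
        subst hb
        exact absurd rfl (hlt a ha).ne
      by_cases hm : m < dd
      · -- new, larger key dd: fresh insert appends (dd, 1)
        have hddnot : dd ∉ d.keys := by
          rw [hkeys]
          simp only [List.mem_append, List.mem_singleton]
          rintro (h | h)
          · exact absurd (lt_trans (hlt dd h) hm) (lt_irrefl dd)
          · subst h; exact lt_irrefl dd hm
        have hcont : d.contains dd = false := by
          by_contra h
          exact hddnot ((PySem.Dict.contains_iff_mem_keys d dd).mp (by simpa using h))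
        have hgetD : d.getD dd 0 = 0 := PySem.Dict.getD_of_not_contains d (0 : Int) hcont
        have hins : (d.insert dd (d.getD dd 0 + 1)).items = (pre ++ [(m, cnt)]) ++ [(dd, 1)] := by
          rw [PySem.Dict.items_insert_of_not_contains d _ hcont, hitems, hgetD]
          norm_num
        have hlt' : ∀ k ∈ (pre ++ [(m, cnt)]).map Prod.fst, k < dd := by
          intro k hk
          simp only [List.map_append, List.mem_append, List.map_cons, List.map_nil,
            List.mem_singleton] at hk
          rcases hk with h | h
          · exact lt_trans (hlt k h) hm
          · subst h; exact hm
        have hnd' : ((pre ++ [(m, cnt)]).map Prod.fst).Nodup := by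
          simp only [List.map_append]
          refine List.Nodup.append hnd (by simp) ?_
          intro a ha hb
          simp only [List.map_cons, List.map_nil, List.mem_singleton] at hb
          rw [hb] at ha
          exact absurd rfl (hlt m ha).ne
        rw [prefScan, if_pos hm, List.foldl_cons,
          ih _ (pre ++ [(m, cnt)]) dd 1 (by rw [hins]) hlt' hnd']
        simp [grp, hm]
      · -- repeated key m: in-place overwrite bumps cnt
        have hmmem : (m, cnt) ∈ d.items := by rw [hitems]; simp
        have hgetD : d.getD m 0 = cnt := PySem.Dict.getD_of_mem_items d hmmem hndk 0
        have hcont : d.contains m = true :=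
          (PySem.Dict.contains_iff_mem_keys d m).mpr (by rw [hkeys]; simp)
        have hins : (d.insert m (d.getD m 0 + 1)).items = pre ++ [(m, cnt + 1)] := by
          rw [PySem.Dict.items_insert_of_contains d _ hcont, hitems, hgetD,
            List.map_append]
          congr 1
          · refine (List.map_congr_left ?_).trans (List.map_id pre)
            intro p hp
            have : p.1 ≠ m := (hlt p.1 (List.mem_map_of_mem hp)).ne
            simp [this]
          · simp
        rw [prefScan, if_neg hm, List.foldl_cons, ih _ pre m (cnt + 1) hins hlt hnd]
        simp [grp, hm]

-- ===== VERDICT (by name: the statement is the Claim_ definition above) =====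
theorem solution_spec : Claim_equal_solution := by
  intro progresses speeds _ hpre
  obtain ⟨hp, hs, _⟩ := hpre
  unfold Spec_solution solution solution_alt
  rw [finish_eq]
  obtain ⟨p0, p', rfl⟩ := List.exists_cons_of_ne_nil hp
  obtain ⟨s0, s', rfl⟩ := List.exists_cons_of_ne_nil hs
  simp only [List.zip_cons_cons, List.map_cons]
  obtain ⟨mf, hmf⟩ := pref_fold ((p'.zip s').map dayOf) [dayOf (p0, s0)] (dayOf (p0, s0))
  have hpref : (((dayOf (p0, s0) :: (p'.zip s').map dayOf).foldl prefStep ([], none)).1 : List Int)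
      = dayOf (p0, s0) :: prefScan (dayOf (p0, s0)) ((p'.zip s').map dayOf) := by
    rw [List.foldl_cons]
    have : prefStep ([], none) (dayOf (p0, s0)) = ([dayOf (p0, s0)], some (dayOf (p0, s0))) := by
      simp [prefStep]
    rw [this, hmf]
    rfl
  rw [hpref]
  have hc0 : (PySem.Dict.empty : PySem.Dict Int Int).contains (dayOf (p0, s0)) = false :=
    PySem.Dict.contains_empty _
  have hd0 : ((PySem.Dict.empty : PySem.Dict Int Int).insert (dayOf (p0, s0))
      ((PySem.Dict.empty : PySem.Dict Int Int).getD (dayOf (p0, s0)) 0 + 1)).items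
      = [] ++ [(dayOf (p0, s0), 1)] := by
    rw [PySem.Dict.items_insert_of_not_contains _ _ hc0, PySem.Dict.getD_empty]
    simp [PySem.Dict.empty]
  rw [PySem.List.pyGetD_zero_cons,
    loopA_eq (dayOf (p0, s0) :: (p'.zip s').map dayOf) ((p'.zip s').map dayOf).length 1
      (by simp) (by simp) 1 (dayOf (p0, s0)) [], List.foldl_cons,
    countFold ((p'.zip s').map dayOf) _ [] (dayOf (p0, s0)) 1 hd0 (by simp) (by simp)]
  simp
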